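-- pv_equiv track=rewrite | github.com/jcooper212/autoExamCreation | autoExam.py | create_student_view
-- ===== SOURCE A (Python) =====
-- def create_student_view(test, num_questions):
--     student_view = {1: ''}
--     qstn_num =1
--     for line in test.split('\n'):
--         if not line.startswith("Correct Answer:"):
--             student_view[qstn_num] += line+ '\n'
--         else:
--             if qstn_num < num_questions:
--                 qstn_num +=1
--                 student_view[qstn_num]= ''
--     return student_view
-- ===== SOURCE B (Python) =====
-- def _render(seg):
--     return ''.join(l + '\n' for l in seg)
--
-- def create_student_view(test, num_questions):
--     # pass 1: partition the lines into segments at 'Correct Answer:' lines (markers dropped)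
--     done, cur = [], []
--     for line in test.split('\n'):
--         if line.startswith("Correct Answer:"):
--             done.append(cur)
--             cur = []
--         else:
--             cur.append(line)
--     segs = done + [cur]
--     # pass 2: assemble the view; everything from segment cap onwards merges into question cap
--     cap = max(1, min(len(segs), num_questions))
--     view = {i: _render(segs[i - 1]) for i in range(1, cap)}
--     view[cap] = ''.join(_render(s) for s in segs[cap - 1:])
--     return view
-- ===== Notes on version B (the rewrite author's own statement) =====
-- stated objective: alternative
-- what changed: A accumulates into a dict inside one loop with an inline question-counter cap; B first partitions the lines into pure segments at the marker lines, then assembles the dict in a separate pass (one rendered segment per question, all remaining segments merged into the last question).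
import Mathlib
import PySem

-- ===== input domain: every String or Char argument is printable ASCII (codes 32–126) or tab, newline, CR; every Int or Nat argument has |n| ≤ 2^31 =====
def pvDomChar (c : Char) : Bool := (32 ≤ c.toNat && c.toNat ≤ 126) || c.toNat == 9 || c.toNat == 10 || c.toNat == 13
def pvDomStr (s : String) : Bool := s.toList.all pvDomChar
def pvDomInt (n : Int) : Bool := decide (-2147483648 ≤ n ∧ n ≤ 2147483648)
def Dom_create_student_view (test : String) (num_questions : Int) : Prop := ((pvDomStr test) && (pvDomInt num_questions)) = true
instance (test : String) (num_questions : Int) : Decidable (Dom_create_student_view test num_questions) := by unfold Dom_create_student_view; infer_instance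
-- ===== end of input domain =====

-- B replaces A's single accumulate-with-cap loop by a two-pass decomposition (partition the
-- lines into segments at the marker lines, then assemble the per-question dict); same cost.

-- ===== PORT A =====
-- loop body of A; 'student_view[qstn_num] += line+"\n"' is Dict.modify (the key is always present, so the default "" is never consulted)
def csvStepA (nq : Int) (st : PySem.Dict Int String × Int) (line : String) : PySem.Dict Int String × Int :=
  if !(PySem.Str.startswith line "Correct Answer:") then
    (st.1.modify st.2 "" (fun s => s ++ (line ++ "\n")), st.2)
  else if st.2 < nq then
    (st.1.insert (st.2 + 1) "", st.2 + 1)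
  else st

def create_student_view (test : String) (num_questions : Int) : List (Int × String) :=
  (((PySem.Str.split? test "\n").getD []).foldl (csvStepA num_questions)
    (PySem.Dict.empty.insert 1 "", 1)).1.items

-- ===== PORT B =====
def csvRender (seg : List String) : String := PySem.Str.join "" (seg.map (fun l => l ++ "\n"))

def csvStepB (st : List (List String) × List String) (line : String) : List (List String) × List String :=
  if PySem.Str.startswith line "Correct Answer:" then (st.1 ++ [st.2], []) else (st.1, st.2 ++ [line])

def csvCap (n nq : Int) : Int := max 1 (min n nq)

def csvAssemble (segs : List (List String)) (nq : Int) : List (Int × String) :=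
  (PySem.List.pyRange 1 (csvCap (segs.length : Int) nq) 1).map
      (fun i => (i, csvRender (PySem.List.pyGetD segs (i - 1) []))) ++
    [(csvCap (segs.length : Int) nq,
      PySem.Str.join "" ((PySem.List.slice segs (some (csvCap (segs.length : Int) nq - 1)) none).map csvRender))]

def create_student_view_alt (test : String) (num_questions : Int) : List (Int × String) :=
  let p := ((PySem.Str.split? test "\n").getD []).foldl csvStepB ([], [])
  csvAssemble (p.1 ++ [p.2]) num_questions

-- ===== PRECONDITION & SPEC =====
def Spec_create_student_view (test : String) (num_questions : Int) (out : List (Int × String)) : Prop := out = create_student_view_alt test num_questions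
instance (test : String) (num_questions : Int) (out : List (Int × String)) : Decidable (Spec_create_student_view test num_questions out) := by unfold Spec_create_student_view; infer_instance

-- ===== CLAIM (what is proved, stated in full; the proofs are below) =====
def Claim_equal_create_student_view : Prop := ∀ (test : String) (num_questions : Int), Dom_create_student_view test num_questions → Spec_create_student_view test num_questions (create_student_view test num_questions)

-- ===== LEMMAS AND PROOFS =====

lemma csv_join_nil : PySem.Str.join "" ([] : List String) = "" := by
  simp [PySem.Str.join, PySem.Chars.join, List.intercalate]

lemma csv_intercalate_nil (l : List (List Char)) : List.intercalate ([] : List Char) l = l.flatten := by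
  induction l with
  | nil => simp [List.intercalate]
  | cons x t ih =>
      cases t with
      | nil => simp [List.intercalate]
      | cons y s =>
          have h : List.intercalate ([] : List Char) (x :: y :: s) =
              x ++ List.intercalate ([] : List Char) (y :: s) := by
            simp [List.intercalate]
          rw [h, ih]; simp

lemma csv_join_append (a b : List String) :
    PySem.Str.join "" (a ++ b) = PySem.Str.join "" a ++ PySem.Str.join "" b := by
  have h : ∀ l : List String, (PySem.Str.join "" l).toList = (l.map String.toList).flatten := by
    intro l
    simp [PySem.Str.toList_join, PySem.Chars.join, csv_intercalate_nil]
  have hts : (PySem.Str.join "" (a ++ b)).toList =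
      (PySem.Str.join "" a ++ PySem.Str.join "" b).toList := by
    simp [h, String.toList_append]
  calc PySem.Str.join "" (a ++ b)
      = String.ofList (PySem.Str.join "" (a ++ b)).toList := by rw [String.ofList_toList]
    _ = String.ofList (PySem.Str.join "" a ++ PySem.Str.join "" b).toList := by rw [hts]
    _ = _ := String.ofList_toList

lemma csv_join_singleton (s : String) : PySem.Str.join "" [s] = s := by
  calc PySem.Str.join "" [s]
      = String.ofList (PySem.Str.join "" [s]).toList := by rw [String.ofList_toList]
    _ = String.ofList s.toList := by
        simp [PySem.Str.toList_join, PySem.Chars.join, csv_intercalate_nil]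
    _ = s := String.ofList_toList

lemma csv_render_nil : csvRender [] = "" := by simp [csvRender, csv_join_nil]

lemma csv_render_snoc (seg : List String) (l : String) :
    csvRender (seg ++ [l]) = csvRender seg ++ (l ++ "\n") := by
  simp [csvRender, csv_join_append, csv_join_singleton]

-- dict helpers: a literal dict pre ++ [(k,t)] with all earlier keys ≠ k
lemma dict_contains_last (pre : List (Int × String)) (k : Int) (t : String) :
    (PySem.Dict.mk (pre ++ [(k, t)])).contains k = true := by
  simp [PySem.Dict.contains_mk]

lemma dict_getD_last (pre : List (Int × String)) (k : Int) (t d0 : String)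
    (h : ∀ p ∈ pre, p.1 ≠ k) : (PySem.Dict.mk (pre ++ [(k, t)])).getD k d0 = t := by
  induction pre with
  | nil => simp [PySem.Dict.getD_eq_get?_getD, PySem.Dict.get?_mk_cons]
  | cons p rest ih =>
      obtain ⟨k', v'⟩ := p
      have hp : (k' == k) = false := beq_eq_false_iff_ne.mpr (h (k', v') (by simp))
      have hrest := ih (fun q hq => h q (by simp [hq]))
      rw [PySem.Dict.getD_eq_get?_getD] at hrest ⊢
      simpa [List.cons_append, PySem.Dict.get?_mk_cons, hp] using hrest

lemma dict_modify_last (pre : List (Int × String)) (k : Int) (t d0 : String) (f : String → String)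
    (h : ∀ p ∈ pre, p.1 ≠ k) :
    (PySem.Dict.mk (pre ++ [(k, t)])).modify k d0 f = PySem.Dict.mk (pre ++ [(k, f t)]) := by
  have hc := dict_contains_last pre k t
  have hg := dict_getD_last pre k t d0 h
  apply PySem.Dict.ext
  rw [show (PySem.Dict.mk (pre ++ [(k, t)])).modify k d0 f
      = (PySem.Dict.mk (pre ++ [(k, t)])).insert k (f ((PySem.Dict.mk (pre ++ [(k, t)])).getD k d0)) from rfl,
    PySem.Dict.items_insert_of_contains _ _ hc, hg]
  simp only [List.map_append, List.map_cons, List.map_nil, beq_self_eq_true]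
  congr 1
  have hmap : List.map (fun p => if (p.1 == k) = true then (k, f t) else p) pre = List.map id pre :=
    List.map_congr_left (fun p hp => by simp [beq_eq_false_iff_ne.mpr (h p hp)])
  rw [hmap, List.map_id]

lemma dict_insert_fresh (ps : List (Int × String)) (k : Int) (v : String)
    (h : ∀ p ∈ ps, p.1 ≠ k) :
    (PySem.Dict.mk ps).insert k v = PySem.Dict.mk (ps ++ [(k, v)]) := by
  apply PySem.Dict.ext
  rw [PySem.Dict.items_insert_of_not_contains]
  simp only [PySem.Dict.contains_mk, List.any_eq_false]
  intro p hp
  simpa using h p hp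

lemma csv_pyGetD_append_left {xs ys : List (List String)} {i : Int}
    (h0 : 0 ≤ i) (h : i < (xs.length : Int)) :
    PySem.List.pyGetD (xs ++ ys) i [] = PySem.List.pyGetD xs i [] := by
  rw [PySem.List.pyGetD_of_nonneg _ _ h0, PySem.List.pyGetD_of_nonneg _ _ h0]
  have hlt : i.toNat < xs.length := by omega
  simp [List.getD, List.getElem?_append_left hlt]

lemma csv_pyGetD_concat (xs : List (List String)) (y : List String) :
    PySem.List.pyGetD (xs ++ [y]) ((xs.length : Int)) [] = y := by
  rw [PySem.List.pyGetD_of_nonneg _ _ (by positivity)]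
  simp [List.getD]

-- canonical form of csvAssemble on done ++ [cur]
lemma csv_assemble_eq (done : List (List String)) (cur : List String) (nq : Int) :
    csvAssemble (done ++ [cur]) nq =
      (PySem.List.pyRange 1 (csvCap ((done.length : Int) + 1) nq) 1).map
          (fun i => (i, csvRender (PySem.List.pyGetD done (i - 1) []))) ++
        [(csvCap ((done.length : Int) + 1) nq,
          PySem.Str.join "" ((done.drop ((csvCap ((done.length : Int) + 1) nq - 1).toNat)).map csvRender)
            ++ csvRender cur)] := by
  have hlen : (((done ++ [cur]).length : Nat) : Int) = (done.length : Int) + 1 := by simp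
  rw [csvAssemble, hlen]
  have hc1 : 1 ≤ csvCap ((done.length : Int) + 1) nq := by unfold csvCap; omega
  have hc2 : csvCap ((done.length : Int) + 1) nq ≤ (done.length : Int) + 1 := by unfold csvCap; omega
  congr 1
  · apply List.map_congr_left
    intro i hi
    obtain ⟨h1, h2⟩ := PySem.List.mem_pyRange_one.mp hi
    rw [csv_pyGetD_append_left (by omega) (by omega)]
  · rw [PySem.List.slice_from _ (by omega : (0:Int) ≤ csvCap ((done.length : Int) + 1) nq - 1)]
    rw [List.drop_append_of_le_length (by omega : (csvCap ((done.length : Int) + 1) nq - 1).toNat ≤ done.length)]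
    rw [List.map_append, csv_join_append]
    simp [csv_join_singleton]

-- the single-step correspondence
lemma csv_step (nq : Int) (done : List (List String)) (cur : List String) (line : String) :
    csvStepA nq (PySem.Dict.mk (csvAssemble (done ++ [cur]) nq), csvCap ((done.length : Int) + 1) nq) line
      = (PySem.Dict.mk (csvAssemble ((csvStepB (done, cur) line).1 ++ [(csvStepB (done, cur) line).2]) nq),
         csvCap (((csvStepB (done, cur) line).1.length : Int) + 1) nq) := by
  have hc1 : 1 ≤ csvCap ((done.length : Int) + 1) nq := by unfold csvCap; omega
  have hc2 : csvCap ((done.length : Int) + 1) nq ≤ (done.length : Int) + 1 := by unfold csvCap; omega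
  have hkeys : ∀ p ∈ (PySem.List.pyRange 1 (csvCap ((done.length : Int) + 1) nq) 1).map
      (fun i => (i, csvRender (PySem.List.pyGetD done (i - 1) []))),
      p.1 < csvCap ((done.length : Int) + 1) nq := by
    intro p hp
    obtain ⟨i, hi, rfl⟩ := List.mem_map.mp hp
    exact (PySem.List.mem_pyRange_one.mp hi).2
  by_cases hm : PySem.Str.startswith line "Correct Answer:" = true
  · -- marker line
    by_cases hlt : csvCap ((done.length : Int) + 1) nq < nq
    · -- below the cap: A opens a fresh question, B closes the current segment
      have hcL : csvCap ((done.length : Int) + 1) nq = (done.length : Int) + 1 := by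
        unfold csvCap at hlt ⊢; omega
      have hc' : csvCap (((done ++ [cur]).length : Int) + 1) nq
          = csvCap ((done.length : Int) + 1) nq + 1 := by
        simp only [List.length_append, List.length_cons, List.length_nil]
        unfold csvCap at hlt ⊢; push_cast; omega
      simp only [csvStepA, csvStepB, hm, Bool.not_true, Bool.false_eq_true, if_false, if_true, if_pos hlt]
      rw [Prod.mk.injEq]
      refine ⟨?_, by rw [hc']⟩
      rw [csv_assemble_eq done cur nq,
        dict_insert_fresh _ _ _ (by
          intro p hp
          rcases List.mem_append.mp hp with h | h
          · exact ne_of_lt (lt_trans (hkeys p h) (by omega))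
          · rw [List.mem_singleton] at h
            have hp1 : p.1 = csvCap ((done.length : Int) + 1) nq := by rw [h]
            rw [hp1]; omega),
        csv_assemble_eq (done ++ [cur]) [] nq, hc']
      congr 1
      rw [PySem.List.pyRange_one_succ_right hc1, List.map_append]
      congr 1
      · congr 1
        · apply List.map_congr_left
          intro i hi
          obtain ⟨h1, h2⟩ := PySem.List.mem_pyRange_one.mp hi
          rw [csv_pyGetD_append_left (by omega) (by omega)]
        · -- the entry the marker finishes: render of the just-closed segment
          simp only [List.map_cons, List.map_nil]
          have hdone : ((done.drop ((csvCap ((done.length : Int) + 1) nq - 1).toNat)) : List (List String)) = [] := by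
            apply List.drop_eq_nil_of_le; omega
          have hcur : PySem.List.pyGetD (done ++ [cur])
              (csvCap ((done.length : Int) + 1) nq - 1) [] = cur := by
            have h : csvCap ((done.length : Int) + 1) nq - 1 = (done.length : Int) := by omega
            rw [h, csv_pyGetD_concat]
          rw [hcur, hdone]
          simp [csv_join_nil]
      · -- the freshly opened empty question
        have hdrop2 : (done ++ [cur]).drop ((csvCap ((done.length : Int) + 1) nq + 1 - 1).toNat) = [] := by
          apply List.drop_eq_nil_of_le; simp; omega
        rw [hdrop2]
        simp [csv_join_nil, csv_render_nil]
    · -- at the cap: A drops the marker, B merges the segment into the last question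
      have hc' : csvCap (((done ++ [cur]).length : Int) + 1) nq
          = csvCap ((done.length : Int) + 1) nq := by
        simp only [List.length_append, List.length_cons, List.length_nil]
        unfold csvCap at hlt ⊢; push_cast; omega
      simp only [csvStepA, csvStepB, hm, Bool.not_true, Bool.false_eq_true, if_false, if_true, if_neg hlt]
      rw [Prod.mk.injEq]
      refine ⟨?_, by rw [hc']⟩
      rw [csv_assemble_eq done cur nq,
        csv_assemble_eq (done ++ [cur]) [] nq, hc']
      congr 1
      congr 1
      · apply List.map_congr_left
        intro i hi
        obtain ⟨h1, h2⟩ := PySem.List.mem_pyRange_one.mp hi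
        rw [csv_pyGetD_append_left (by omega) (by omega)]
      · rw [List.drop_append_of_le_length (by omega : (csvCap ((done.length : Int) + 1) nq - 1).toNat ≤ done.length)]
        rw [List.map_append, csv_join_append]
        simp [csv_join_singleton, csv_render_nil]
  · -- ordinary line: A appends to the current entry, B appends to the current segment
    have hm' : PySem.Str.startswith line "Correct Answer:" = false := by
      simpa using hm
    simp only [csvStepA, csvStepB, hm', Bool.not_false, if_true, Bool.false_eq_true, if_false]
    rw [Prod.mk.injEq]
    refine ⟨?_, rfl⟩
    rw [csv_assemble_eq done cur nq,
      dict_modify_last _ _ _ _ _ (fun p hp => ne_of_lt (hkeys p hp)),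
      csv_assemble_eq done (cur ++ [line]) nq, csv_render_snoc]
    simp [String.append_assoc]

lemma csv_loop (nq : Int) (ls : List String) :
    ∀ (done : List (List String)) (cur : List String),
      ls.foldl (csvStepA nq) (PySem.Dict.mk (csvAssemble (done ++ [cur]) nq), csvCap ((done.length : Int) + 1) nq)
        = (PySem.Dict.mk (csvAssemble ((ls.foldl csvStepB (done, cur)).1 ++ [(ls.foldl csvStepB (done, cur)).2]) nq),
           csvCap (((ls.foldl csvStepB (done, cur)).1.length : Int) + 1) nq) := by
  induction ls with
  | nil => intro done cur; rfl
  | cons x t ih =>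
      intro done cur
      rw [List.foldl_cons, List.foldl_cons, csv_step]
      exact ih (csvStepB (done, cur) x).1 (csvStepB (done, cur) x).2

lemma csv_assemble_init (nq : Int) : csvAssemble [[]] nq = [(1, "")] := by
  have hcap : csvCap ((([[]] : List (List String)).length : Int)) nq = 1 := by
    simp [csvCap]
  rw [csvAssemble, hcap]
  simp [PySem.List.pyRange_one_eq_nil le_rfl, csv_render_nil, csv_join_singleton]

-- ===== VERDICT (by name: the statement is the Claim_ definition above) =====
theorem create_student_view_spec : Claim_equal_create_student_view := by
  intro test nq _
  unfold Spec_create_student_view create_student_view create_student_view_alt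
  have h0 : (PySem.Dict.empty.insert (1 : Int) "", (1 : Int))
      = (PySem.Dict.mk (csvAssemble (([] : List (List String)) ++ [[]]) nq),
         csvCap ((([] : List (List String)).length : Int) + 1) nq) := by
    have h1 : csvCap ((([] : List (List String)).length : Int) + 1) nq = 1 := by
      simp [csvCap]
    rw [h1]
    congr 1
    apply PySem.Dict.ext
    rw [PySem.Dict.items_insert_of_not_contains _ _ (by simp)]
    simp [csv_assemble_init, PySem.Dict.empty]
  rw [h0, csv_loop]
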